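-- pv_equiv track=rewrite | github.com/eostapenko-mipt/61753381 | lib/experiments.py | has_mutual_job_intersection
-- ===== SOURCE A (Python) =====
-- import itertools
-- from collections import defaultdict
--
-- def get_job_time_slots(s):
--     # s: list = расписание
--     job_times = defaultdict(list)
--     for t, j in enumerate(s, start=1):
--         job_times[j].append(t)
--     return job_times
--
-- def is_job_intersects(j2, j1, job_times):
--     # j1: int = номер прерываемой работы
--     # j2: int = номер прерывающей работы
--     # job_times: get_job_time_slots()
--     if not job_times[j1] or not job_times[j2]:
--         return False
--     start = job_times[j1][0]
--     compl = job_times[j1][-1]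
--     for t in job_times[j2]:
--         if start < t < compl:
--             return True
--     return False
--
-- def has_mutual_job_intersection(s, job_times=None):
--     # s: list = расписание
--     # job_times: get_job_time_slots()
--     if not job_times:
--         job_times = get_job_time_slots(s)
--     for j1, j2 in itertools.combinations(job_times.keys(), 2):
--         if (
--                 is_job_intersects(j2, j1, job_times)
--             and is_job_intersects(j1, j2, job_times)
--         ):
--             return True
--     return False
-- ===== SOURCE B (Python) =====
-- import itertools
--
--
-- def has_mutual_job_intersection(s, job_times=None):
--     if not job_times:
--         job_times = {}
--         for t, j in enumerate(s, start=1):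
--             job_times.setdefault(j, []).append(t)
--     # one slot-major marking pass: hit contains (a, b) iff some slot of job a
--     # lies strictly inside job b's span (first slot, last slot)
--     spans = {j: (ts[0], ts[-1]) for j, ts in job_times.items() if ts}
--     hit = set()
--     for j2, ts in job_times.items():
--         for t in ts:
--             for j1, (a, b) in spans.items():
--                 if a < t < b:
--                     hit.add((j2, j1))
--     return any(
--         (j1, j2) in hit and (j2, j1) in hit
--         for j1, j2 in itertools.combinations(job_times, 2)
--     )
-- ===== Notes on version B (the rewrite author's own statement) =====
-- stated objective: alternative
-- what changed: Replaces A's pair-major search (for every pair of jobs, re-scan each job's slot lists) by one slot-major marking pass that builds a span table and a 'hit' relation set, after which each pair is decided by two set lookups instead of two slot scans; trades A's early exit for a single precomputation.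
import Mathlib
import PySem

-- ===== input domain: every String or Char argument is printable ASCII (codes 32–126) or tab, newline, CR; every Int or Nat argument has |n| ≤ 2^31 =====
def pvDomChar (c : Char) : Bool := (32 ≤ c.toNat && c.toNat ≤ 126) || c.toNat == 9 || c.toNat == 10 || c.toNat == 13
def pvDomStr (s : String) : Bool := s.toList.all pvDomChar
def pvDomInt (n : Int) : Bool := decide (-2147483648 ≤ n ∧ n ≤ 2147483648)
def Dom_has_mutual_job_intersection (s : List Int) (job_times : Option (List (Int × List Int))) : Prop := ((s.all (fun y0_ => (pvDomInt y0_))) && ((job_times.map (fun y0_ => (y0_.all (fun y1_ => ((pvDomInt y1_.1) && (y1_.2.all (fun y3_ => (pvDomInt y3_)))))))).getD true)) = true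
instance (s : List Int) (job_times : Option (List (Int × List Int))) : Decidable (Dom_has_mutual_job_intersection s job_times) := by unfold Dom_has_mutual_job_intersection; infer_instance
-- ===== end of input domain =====

-- B replaces A's pair-major search (re-scanning slot lists for every pair) by one
-- slot-major marking pass building a span table and a 'hit' relation set, then decides
-- each pair by two set lookups (objective: alternative algorithm, similar cost).

-- ===== PORT A =====
-- get_job_time_slots: defaultdict(list); d[j].append(t) for t,j in enumerate(s, 1)
def pv_get_job_time_slots (s : List Int) : PySem.Dict Int (List Int) :=
  (PySem.List.enumerate s 1).foldl
    (fun d p => d.modify p.2 [] (fun l => l ++ [p.1])) PySem.Dict.empty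

-- is_job_intersects(j2, j1, job_times); headD/getLastD stand for [0]/[-1], guarded nonempty
def pv_is_job_intersects (j2 j1 : Int) (d : PySem.Dict Int (List Int)) : Bool :=
  let l1 := d.getD j1 []
  let l2 := d.getD j2 []
  if l1.isEmpty || l2.isEmpty then false
  else
    let start := l1.headD 0
    let compl := l1.getLastD 0
    l2.any (fun t => decide (start < t) && decide (t < compl))

-- for j1, j2 in itertools.combinations(keys, 2): if f(j1, j2): return True
def pv_combi_any (f : Int → Int → Bool) : List Int → Bool
  | [] => false
  | k :: ks => ks.any (fun k2 => f k k2) || pv_combi_any f ks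

def has_mutual_job_intersection (s : List Int) (job_times : Option (List (Int × List Int))) : Bool :=
  let d := match job_times with
    | none => pv_get_job_time_slots s
    | some l => if l.isEmpty then pv_get_job_time_slots s else PySem.Dict.ofList l
  pv_combi_any (fun j1 j2 => pv_is_job_intersects j2 j1 d && pv_is_job_intersects j1 j2 d) d.keys

-- ===== PORT B =====
-- job_times.setdefault(j, []).append(t) for t, j in enumerate(s, 1)
def pvB_build (s : List Int) : PySem.Dict Int (List Int) :=
  (PySem.List.enumerate s 1).foldl
    (fun d p => d.modify p.2 [] (fun l => l ++ [p.1])) PySem.Dict.empty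

-- spans = {j: (ts[0], ts[-1]) for j, ts in job_times.items() if ts}
def pvB_spans (d : PySem.Dict Int (List Int)) : PySem.Dict Int (Int × Int) :=
  d.items.foldl
    (fun sp p => if p.2.isEmpty then sp else sp.insert p.1 (p.2.headD 0, p.2.getLastD 0))
    PySem.Dict.empty

-- the marking pass: hit.add((j2, j1)) whenever a slot t of j2 lies strictly inside span j1
def pvB_hit (d : PySem.Dict Int (List Int)) : PySem.Set (Int × Int) :=
  d.items.foldl (fun h p =>
    p.2.foldl (fun h t =>
      (pvB_spans d).items.foldl (fun h q =>
        if decide (q.2.1 < t) && decide (t < q.2.2) then PySem.Set.add h (p.1, q.1) else h) h) h)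
    PySem.Set.empty

-- itertools.combinations(keys, 2) as a pair list
def pvB_combinations2 : List Int → List (Int × Int)
  | [] => []
  | k :: ks => ks.map (fun k2 => (k, k2)) ++ pvB_combinations2 ks

def has_mutual_job_intersection_alt (s : List Int) (job_times : Option (List (Int × List Int))) : Bool :=
  let d := match job_times with
    | none => pvB_build s
    | some l => if l.isEmpty then pvB_build s else PySem.Dict.ofList l
  let hit := pvB_hit d
  (pvB_combinations2 d.keys).any
    (fun p => PySem.Set.contains hit (p.1, p.2) && PySem.Set.contains hit (p.2, p.1))

-- ===== PRECONDITION & SPEC =====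
def Spec_has_mutual_job_intersection (s : List Int) (job_times : Option (List (Int × List Int))) (out : Bool) : Prop := out = has_mutual_job_intersection_alt s job_times
instance (s : List Int) (job_times : Option (List (Int × List Int))) (out : Bool) : Decidable (Spec_has_mutual_job_intersection s job_times out) := by unfold Spec_has_mutual_job_intersection; infer_instance

-- ===== CLAIM (what is proved, stated in full; the proofs are below) =====
def Claim_equal_has_mutual_job_intersection : Prop := ∀ (s : List Int) (job_times : Option (List (Int × List Int))), Dom_has_mutual_job_intersection s job_times → Spec_has_mutual_job_intersection s job_times (has_mutual_job_intersection s job_times)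

-- ===== LEMMAS AND PROOFS =====

-- generic: membership through a foldl whose step adds exactly the a-dependent facts P
theorem pv_mem_foldl_iff {α γ : Type} (P : α → Prop) (F : γ → α → γ) (X : γ → Prop)
    (h : ∀ g a, X (F g a) ↔ X g ∨ P a) :
    ∀ (l : List α) (g : γ), X (l.foldl F g) ↔ X g ∨ ∃ a ∈ l, P a := by
  intro l
  induction l with
  | nil => simp
  | cons a l ih =>
    intro g
    simp [List.foldl_cons, ih, h]
    tauto

theorem pvB_spans_items (d : PySem.Dict Int (List Int)) (hnd : d.keys.Nodup) :
    (pvB_spans d).items =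
      (d.items.filter (fun p => !p.2.isEmpty)).map
        (fun p => (p.1, (p.2.headD 0, p.2.getLastD 0))) := by
  unfold pvB_spans
  have hstep : (fun (sp : PySem.Dict Int (Int × Int)) (p : Int × List Int) =>
      if p.2.isEmpty then sp else sp.insert p.1 (p.2.headD 0, p.2.getLastD 0))
    = (fun sp p => if !p.2.isEmpty then sp.insert p.1 (p.2.headD 0, p.2.getLastD 0) else sp) := by
    funext sp p
    by_cases h : p.2.isEmpty <;> simp [h]
  rw [hstep, ← List.foldl_filter]
  have := PySem.Dict.items_foldl_insert_fresh
    (d.items.filter (fun p => !p.2.isEmpty)) (fun p => p.1)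
    (fun p => (p.2.headD 0, p.2.getLastD 0)) PySem.Dict.empty
    (fun a _ => by simp [PySem.Dict.contains_empty])
    ((List.filter_sublist.map _).nodup hnd)
  simpa using this

theorem pv_lvl1 (si : List (Int × (Int × Int))) (j : Int) (t : Int) (x : Int × Int)
    (g : PySem.Set (Int × Int)) :
    x ∈ si.foldl (fun h q => if decide (q.2.1 < t) && decide (t < q.2.2) then PySem.Set.add h (j, q.1) else h) g
      ↔ x ∈ g ∨ ∃ q ∈ si, (q.2.1 < t ∧ t < q.2.2) ∧ x = (j, q.1) := by
  refine pv_mem_foldl_iff (fun q => (q.2.1 < t ∧ t < q.2.2) ∧ x = (j, q.1)) _ (fun g => x ∈ g) ?_ si g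
  intro g q
  split_ifs with hc
  · simp only [Bool.and_eq_true, decide_eq_true_eq] at hc
    simp only [PySem.Set.mem_add]
    tauto
  · simp only [Bool.and_eq_true, decide_eq_true_eq] at hc
    tauto

theorem pv_lvl2 (si : List (Int × (Int × Int))) (j : Int) (x : Int × Int)
    (ts : List Int) (g : PySem.Set (Int × Int)) :
    x ∈ ts.foldl (fun h t => si.foldl (fun h q => if decide (q.2.1 < t) && decide (t < q.2.2) then PySem.Set.add h (j, q.1) else h) h) g
      ↔ x ∈ g ∨ ∃ t ∈ ts, ∃ q ∈ si, (q.2.1 < t ∧ t < q.2.2) ∧ x = (j, q.1) := by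
  refine pv_mem_foldl_iff (fun t => ∃ q ∈ si, (q.2.1 < t ∧ t < q.2.2) ∧ x = (j, q.1)) _ (fun g => x ∈ g) ?_ ts g
  intro g t
  exact pv_lvl1 si j t x g

theorem pvB_hit_iff (d : PySem.Dict Int (List Int)) (x : Int × Int) :
    x ∈ pvB_hit d
      ↔ ∃ p ∈ d.items, ∃ t ∈ p.2, ∃ q ∈ (pvB_spans d).items,
          (q.2.1 < t ∧ t < q.2.2) ∧ x = (p.1, q.1) := by
  unfold pvB_hit
  have := pv_mem_foldl_iff
    (fun p : Int × List Int => ∃ t ∈ p.2, ∃ q ∈ (pvB_spans d).items, (q.2.1 < t ∧ t < q.2.2) ∧ x = (p.1, q.1))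
    (fun h p => p.2.foldl (fun h t =>
      (pvB_spans d).items.foldl (fun h q =>
        if decide (q.2.1 < t) && decide (t < q.2.2) then PySem.Set.add h (p.1, q.1) else h) h) h)
    (fun g => x ∈ g)
    (fun g p => pv_lvl2 (pvB_spans d).items p.1 x p.2 g)
    d.items PySem.Set.empty
  rw [this]
  simp [PySem.Set.empty]

theorem pv_mem_items_getD (d : PySem.Dict Int (List Int))
    (a : Int) (ha : d.getD a [] ≠ []) : (a, d.getD a []) ∈ d.items := by
  cases hv : d.get? a with
  | none => exact (ha (by rw [PySem.Dict.getD_eq_get?_getD, hv]; rfl)).elim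
  | some v =>
    have hgd : d.getD a [] = v := by rw [PySem.Dict.getD_eq_get?_getD, hv]; rfl
    rw [hgd]
    exact PySem.Dict.mem_items_of_get?_eq_some d hv

theorem pv_inter_iff (a b : Int) (d : PySem.Dict Int (List Int)) :
    pv_is_job_intersects a b d = true ↔
      d.getD b [] ≠ [] ∧ ∃ t ∈ d.getD a [],
        (d.getD b []).headD 0 < t ∧ t < (d.getD b []).getLastD 0 := by
  simp only [pv_is_job_intersects]
  split_ifs with hc
  · simp only [List.isEmpty_iff, Bool.or_eq_true] at hc
    simp only [false_iff]
    rintro ⟨hb, t, ht, -⟩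
    rcases hc with h | h
    · exact hb h
    · rw [h] at ht; exact List.not_mem_nil ht
  · simp only [Bool.or_eq_true, List.isEmpty_iff, not_or] at hc
    simp only [List.any_eq_true, Bool.and_eq_true, decide_eq_true_eq]
    tauto

theorem pvB_hit_mem (d : PySem.Dict Int (List Int)) (hnd : d.keys.Nodup) (a b : Int) :
    PySem.Set.contains (pvB_hit d) (a, b) = pv_is_job_intersects a b d := by
  rw [Bool.eq_iff_iff, PySem.Set.contains_iff, pvB_hit_iff d (a, b), pv_inter_iff,
    pvB_spans_items d hnd]
  constructor
  · rintro ⟨p, hp, t, ht, q, hq, ⟨h1, h2⟩, heq⟩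
    simp only [List.mem_map, List.mem_filter, Bool.not_eq_eq_eq_not, Bool.not_true,
      List.isEmpty_eq_false_iff] at hq
    obtain ⟨p', ⟨hp', hne⟩, rfl⟩ := hq
    have hpa : a = p.1 := by simpa using congrArg Prod.fst heq
    have hpb : b = p'.1 := by simpa using congrArg Prod.snd heq
    have e1 : d.getD a [] = p.2 := by
      rw [hpa]; exact PySem.Dict.getD_of_mem_items d hp hnd []
    have e2 : d.getD b [] = p'.2 := by
      rw [hpb]; exact PySem.Dict.getD_of_mem_items d hp' hnd []
    rw [e1, e2]
    exact ⟨hne, t, ht, h1, h2⟩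
  · rintro ⟨hb, t, ht, h1, h2⟩
    have ha : d.getD a [] ≠ [] := by
      intro h; rw [h] at ht; exact List.not_mem_nil ht
    refine ⟨(a, d.getD a []), pv_mem_items_getD d a ha, t, ht,
      (b, ((d.getD b []).headD 0, (d.getD b []).getLastD 0)), ?_, ⟨h1, h2⟩, rfl⟩
    simp only [List.mem_map, List.mem_filter, Bool.not_eq_eq_eq_not, Bool.not_true,
      List.isEmpty_eq_false_iff]
    exact ⟨(b, d.getD b []), ⟨pv_mem_items_getD d b hb, hb⟩, rfl⟩

theorem pv_build_nodup (s : List Int) : (pv_get_job_time_slots s).keys.Nodup := by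
  unfold pv_get_job_time_slots
  exact PySem.Dict.nodup_keys_foldl_modify_key _ _ _ _ _ PySem.Dict.nodup_keys_empty

theorem pv_combi_any_eq (f : Int → Int → Bool) (l : List Int) :
    pv_combi_any f l = (pvB_combinations2 l).any (fun p => f p.1 p.2) := by
  induction l with
  | nil => rfl
  | cons k ks ih => simp [pv_combi_any, pvB_combinations2, ih, List.any_append, List.any_map, Function.comp_def]

theorem pv_core_eq (d : PySem.Dict Int (List Int)) (hnd : d.keys.Nodup) :
    pv_combi_any (fun j1 j2 => pv_is_job_intersects j2 j1 d && pv_is_job_intersects j1 j2 d) d.keys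
      = (pvB_combinations2 d.keys).any
          (fun p => PySem.Set.contains (pvB_hit d) (p.1, p.2) && PySem.Set.contains (pvB_hit d) (p.2, p.1)) := by
  rw [pv_combi_any_eq]
  congr 1
  funext p
  rw [pvB_hit_mem d hnd, pvB_hit_mem d hnd, Bool.and_comm]

-- ===== VERDICT (by name: the statement is the Claim_ definition above) =====
theorem has_mutual_job_intersection_spec : Claim_equal_has_mutual_job_intersection := by
  intro s job_times _
  unfold Spec_has_mutual_job_intersection has_mutual_job_intersection has_mutual_job_intersection_alt
  have hbuild : pv_get_job_time_slots s = pvB_build s := rfl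
  cases job_times with
  | none =>
    simp only [hbuild]
    exact pv_core_eq _ (pv_build_nodup s)
  | some l =>
    by_cases hl : l.isEmpty
    · simp only [hl, if_pos, hbuild]
      exact pv_core_eq _ (pv_build_nodup s)
    · simp only [hl, hbuild]
      exact pv_core_eq _ (PySem.Dict.nodup_keys_ofList l)
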